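-- pv_equiv track=rewrite | github.com/isaacjacques/COP4521-Markoff-Fibonacci-Problem | solution_sequential.py | markoff
-- ===== SOURCE A (Python) =====
-- def markoff(max):
--     result = set()
--
--     for x in range(1, max + 1):
--         for y in range(x, max + 1):
--             for z in range(y, max + 1):
--                 if x*x + y*y + z*z == 3*x*y*z:
--                     result.update([x, y, z])
--
--     return result
-- ===== SOURCE B (Python) =====
-- def _isqrt(n):
--     # floor integer square root (Newton's method), n >= 0
--     if n == 0:
--         return 0
--     x = n
--     y = (x + 1) // 2
--     while y < x:
--         x = y
--         y = (x + n // x) // 2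
--     return x
--
--
-- def markoff(max):
--     result = set()
--     for x in range(1, max + 1):
--         for y in range(x, max + 1):
--             # z solves z^2 - 3xy z + (x^2+y^2) = 0
--             d = 9*x*x*y*y - 4*(x*x + y*y)
--             s = _isqrt(d)
--             if s * s == d and (3*x*y + s) % 2 == 0:
--                 for z in ((3*x*y - s) // 2, (3*x*y + s) // 2):
--                     if y <= z <= max:
--                         result.update([x, y, z])
--     return result
-- ===== Notes on version B (the rewrite author's own statement) =====
-- stated objective: faster
-- what changed: Instead of scanning all z in the innermost loop, B treats the Markoff equation as a quadratic in z and, for each pair (x,y), computes its at most two integer roots via an integer square root of the discriminant, dropping the third nested loop.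
import Mathlib
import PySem

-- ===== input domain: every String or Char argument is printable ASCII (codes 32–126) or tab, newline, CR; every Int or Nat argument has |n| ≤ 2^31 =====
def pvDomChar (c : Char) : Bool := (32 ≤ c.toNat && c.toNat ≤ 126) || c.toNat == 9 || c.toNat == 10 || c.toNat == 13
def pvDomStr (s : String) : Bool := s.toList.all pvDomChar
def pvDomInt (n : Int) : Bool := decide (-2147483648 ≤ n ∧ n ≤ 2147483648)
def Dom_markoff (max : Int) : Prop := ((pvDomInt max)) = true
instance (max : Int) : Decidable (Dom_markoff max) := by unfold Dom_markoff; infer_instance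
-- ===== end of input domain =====

-- B replaces A's innermost z-scan by solving the Markoff equation as a quadratic in z
-- (integer roots from an integer square root of the discriminant); objective: faster.

-- ===== PORT A =====
def markoff (max : Int) : List Int :=
  (PySem.List.pyRange 1 (max + 1) 1).foldl (fun res x =>
    (PySem.List.pyRange x (max + 1) 1).foldl (fun res y =>
      (PySem.List.pyRange y (max + 1) 1).foldl (fun res z =>
        if x * x + y * y + z * z = 3 * x * y * z then PySem.Set.update res [x, y, z]
        else res) res) res) PySem.Set.empty

-- ===== PORT B =====
-- Newton-iteration floor square root, transliterating Source B's _isqrt.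
-- The '0 ≤ y' conjunct is a totality guard only: for every call B makes (n ≥ 1)
-- each reached y is ≥ 1 (isqrtLoop_spec below), so the loop condition is Python's 'y < x'.
def isqrtLoop (n x y : Int) : Int :=
  if _h : 0 ≤ y ∧ y < x then
    isqrtLoop n y (PySem.Int.floordiv (y + PySem.Int.floordiv n y) 2)
  else x
termination_by x.toNat
decreasing_by omega

def isqrt (n : Int) : Int :=
  if n = 0 then 0
  else isqrtLoop n n (PySem.Int.floordiv (n + 1) 2)

def markoff_alt (max : Int) : List Int :=
  (PySem.List.pyRange 1 (max + 1) 1).foldl (fun res x =>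
    (PySem.List.pyRange x (max + 1) 1).foldl (fun res y =>
      let d := 9 * x * x * y * y - 4 * (x * x + y * y)
      let s := isqrt d
      if s * s = d ∧ PySem.Int.mod (3 * x * y + s) 2 = 0 then
        [PySem.Int.floordiv (3 * x * y - s) 2, PySem.Int.floordiv (3 * x * y + s) 2].foldl
          (fun res z =>
            if y ≤ z ∧ z ≤ max then PySem.Set.update res [x, y, z] else res) res
      else res) res) PySem.Set.empty

-- ===== PRECONDITION & SPEC =====
def Spec_markoff (max : Int) (out : List Int) : Prop := out = markoff_alt max
instance (max : Int) (out : List Int) : Decidable (Spec_markoff max out) := by unfold Spec_markoff; infer_instance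

-- ===== CLAIM (what is proved, stated in full; the proofs are below) =====
def Claim_equal_markoff : Prop := ∀ (max : Int), Dom_markoff max → Spec_markoff max (markoff max)

-- ===== LEMMAS AND PROOFS =====

-- Newton midpoint (x + n/x)/2 stays an upper bound for every candidate root t.
lemma pv_mid_ub (n x t : Int) (_hn : 1 ≤ n) (hx : 1 ≤ x) (_ht : 0 ≤ t) (ht2 : t * t ≤ n) :
    t ≤ (x + n / x) / 2 := by
  have hx0 : (0:Int) < x := by omega
  have h1 : (2 * t - x) * x ≤ n := by nlinarith [mul_self_nonneg (t - x)]
  have h2 : 2 * t - x ≤ n / x := by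
    rw [Int.le_ediv_iff_mul_le hx0]; exact h1
  omega

lemma isqrtLoop_spec (n x y : Int) (hn : 1 ≤ n) (hx : 1 ≤ x)
    (hub : ∀ t : Int, 0 ≤ t → t * t ≤ n → t ≤ x)
    (hy : y = (x + n / x) / 2) :
    1 ≤ isqrtLoop n x y ∧ isqrtLoop n x y * isqrtLoop n x y ≤ n ∧
      ∀ t : Int, 0 ≤ t → t * t ≤ n → t ≤ isqrtLoop n x y := by
  have hy1 : 1 ≤ y := by
    have := pv_mid_ub n x 1 hn hx (by omega) (by omega)
    omega
  have hyub : ∀ t : Int, 0 ≤ t → t * t ≤ n → t ≤ y := by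
    intro t ht ht2
    have := pv_mid_ub n x t hn hx ht ht2
    omega
  rw [isqrtLoop]
  by_cases hlt : y < x
  · rw [dif_pos ⟨by omega, hlt⟩]
    have e : PySem.Int.floordiv (y + PySem.Int.floordiv n y) 2 = (y + n / y) / 2 := by
      rw [PySem.Int.floordiv_eq_ediv_of_pos (by omega : (0:Int) < y),
          PySem.Int.floordiv_eq_ediv_of_pos (by omega : (0:Int) < 2)]
    rw [e]
    exact isqrtLoop_spec n y _ hn hy1 hyub rfl
  · rw [dif_neg (by omega)]
    have hxy : x ≤ y := by omega
    have hq : x ≤ n / x := by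
      have h2x : 2 * x ≤ x + n / x := by
        have := hy
        omega
      omega
    have hx2 : x * x ≤ n := by
      have := (Int.le_ediv_iff_mul_le (show (0:Int) < x by omega)).mp hq
      linarith
    exact ⟨hx, hx2, hub⟩
termination_by x.toNat
decreasing_by omega

lemma isqrt_spec (n : Int) (hn : 1 ≤ n) :
    1 ≤ isqrt n ∧ isqrt n * isqrt n ≤ n ∧
      ∀ t : Int, 0 ≤ t → t * t ≤ n → t ≤ isqrt n := by
  rw [isqrt, if_neg (by omega : ¬ n = 0)]
  have hself : n / n = 1 := Int.ediv_self (by omega)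
  have e : PySem.Int.floordiv (n + 1) 2 = (n + n / n) / 2 := by
    rw [PySem.Int.floordiv_eq_ediv_of_pos (by omega : (0:Int) < 2), hself]
  rw [e]
  refine isqrtLoop_spec n n _ hn (by omega) ?_ rfl
  intro t ht ht2
  nlinarith [mul_self_nonneg (t - 1)]

-- a guarded fold is a fold over the filtered list
lemma pv_foldl_ite {α β : Type} (p : α → Prop) [DecidablePred p] (g : β → α → β) :
    ∀ (l : List α) (init : β),
      l.foldl (fun r z => if p z then g r z else r) init
        = (l.filter (fun z => decide (p z))).foldl g init := by
  intro l
  induction l with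
  | nil => intro init; rfl
  | cons a l ih => intro init; by_cases h : p a <;> simp [h, ih]

-- two strictly increasing lists with the same members coincide
lemma pv_eq_of_pairwise_lt_of_mem (l₁ l₂ : List Int)
    (h₁ : l₁.Pairwise (· < ·)) (h₂ : l₂.Pairwise (· < ·))
    (hm : ∀ a, a ∈ l₁ ↔ a ∈ l₂) : l₁ = l₂ := by
  have n₁ : l₁.Nodup := h₁.imp (fun h => ne_of_lt h)
  have n₂ : l₂.Nodup := h₂.imp (fun h => ne_of_lt h)
  exact List.Perm.eq_of_pairwise (fun a b _ _ hab hba => by omega) h₁ h₂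
    ((List.perm_ext_iff_of_nodup n₁ n₂).mpr hm)

-- the heart: for 1 ≤ x ≤ y, A's z-scan equals B's quadratic-root computation
lemma pv_inner (mx x y : Int) (hx : 1 ≤ x) (hxy : x ≤ y) (res : List Int) :
    (PySem.List.pyRange y (mx + 1) 1).foldl (fun res z =>
        if x * x + y * y + z * z = 3 * x * y * z then PySem.Set.update res [x, y, z]
        else res) res
    = (if isqrt (9 * x * x * y * y - 4 * (x * x + y * y)) * isqrt (9 * x * x * y * y - 4 * (x * x + y * y)) = 9 * x * x * y * y - 4 * (x * x + y * y) ∧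
          PySem.Int.mod (3 * x * y + isqrt (9 * x * x * y * y - 4 * (x * x + y * y))) 2 = 0 then
        [PySem.Int.floordiv (3 * x * y - isqrt (9 * x * x * y * y - 4 * (x * x + y * y))) 2,
         PySem.Int.floordiv (3 * x * y + isqrt (9 * x * x * y * y - 4 * (x * x + y * y))) 2].foldl
          (fun res z => if y ≤ z ∧ z ≤ mx then PySem.Set.update res [x, y, z] else res) res
       else res) := by
  have hy : 1 ≤ y := le_trans hx hxy
  set d : Int := 9 * x * x * y * y - 4 * (x * x + y * y) with hd_def
  have hd : 1 ≤ d := by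
    rw [hd_def]
    have ha : 1 ≤ x * x := by nlinarith
    have hb : 1 ≤ y * y := by nlinarith
    have hab1 : x * x ≤ x * x * (y * y) := by nlinarith
    have hab2 : y * y ≤ x * x * (y * y) := by nlinarith
    nlinarith
  obtain ⟨hs1, hs2, hs3⟩ := isqrt_spec d hd
  set s : Int := isqrt d with hs_def
  have hP : ∀ z : Int, x * x + y * y + z * z = 3 * x * y * z ↔
      (2 * z - 3 * x * y) * (2 * z - 3 * x * y) = d := by
    intro z
    constructor
    · intro h; linear_combination 4 * h
    · intro h
      have h4 : 4 * (x * x + y * y + z * z) - 4 * (3 * x * y * z) = 0 := by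
        linear_combination h
      linarith
  rw [pv_foldl_ite (fun z => x * x + y * y + z * z = 3 * x * y * z)
        (fun r z => PySem.Set.update r [x, y, z]) (PySem.List.pyRange y (mx + 1) 1) res]
  by_cases hcase : s * s = d ∧ PySem.Int.mod (3 * x * y + s) 2 = 0
  · obtain ⟨hsq, hpar⟩ := hcase
    have hdvd : (2:Int) ∣ (3 * x * y + s) := (PySem.Int.mod_eq_zero_iff_dvd _ _).mp hpar
    obtain ⟨k, hk⟩ := hdvd
    have hz2 : PySem.Int.floordiv (3 * x * y + s) 2 = k := by
      rw [PySem.Int.floordiv_eq_ediv_of_pos (by omega : (0:Int) < 2)]; omega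
    have hz1 : PySem.Int.floordiv (3 * x * y - s) 2 = k - s := by
      rw [PySem.Int.floordiv_eq_ediv_of_pos (by omega : (0:Int) < 2)]; omega
    rw [if_pos ⟨hsq, hpar⟩, hz1, hz2]
    rw [pv_foldl_ite (fun z => y ≤ z ∧ z ≤ mx)
          (fun r z => PySem.Set.update r [x, y, z]) [k - s, k] res]
    congr 1
    apply pv_eq_of_pairwise_lt_of_mem
    · exact (PySem.List.pairwise_lt_pyRange_one y (mx + 1)).filter _
    · refine List.Pairwise.filter _ ?_
      refine List.pairwise_pair.mpr ?_
      omega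
    · intro a
      simp only [List.mem_filter, PySem.List.mem_pyRange_one, List.mem_cons,
        List.not_mem_nil, or_false, decide_eq_true_eq]
      constructor
      · rintro ⟨⟨h1, h2⟩, hPa⟩
        have hsqa : (2 * a - 3 * x * y) * (2 * a - 3 * x * y) = s * s := by
          rw [(hP a).mp hPa, hsq]
        have hor : 2 * a - 3 * x * y = s ∨ 2 * a - 3 * x * y = -s :=
          mul_self_eq_mul_self_iff.mp hsqa
        refine ⟨?_, h1, by omega⟩
        omega
      · rintro ⟨hor, h1, h2⟩
        refine ⟨⟨h1, by omega⟩, ?_⟩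
        apply (hP a).mpr
        rcases hor with h | h
        · have : 2 * a - 3 * x * y = -s := by omega
          rw [this]; linear_combination hsq
        · have : 2 * a - 3 * x * y = s := by omega
          rw [this]; exact hsq
  · rw [if_neg hcase]
    have hnil : (PySem.List.pyRange y (mx + 1) 1).filter
        (fun z => decide (x * x + y * y + z * z = 3 * x * y * z)) = [] := by
      rw [List.filter_eq_nil_iff]
      intro a _
      simp only [decide_eq_true_eq]
      intro hPa
      have ht0 : (2 * a - 3 * x * y) * (2 * a - 3 * x * y) = d := (hP a).mp hPa
      set t : Int := 2 * a - 3 * x * y with ht_def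
      have habs1 : t ≤ s := by
        by_cases h : 0 ≤ t
        · exact hs3 t h (le_of_eq ht0)
        · omega
      have habs2 : -t ≤ s := by
        by_cases h : 0 ≤ -t
        · exact hs3 (-t) h (by nlinarith)
        · omega
      have hsq : s * s = d := by nlinarith
      have hpar : PySem.Int.mod (3 * x * y + s) 2 = 0 := by
        rw [PySem.Int.mod_eq_zero_iff_dvd]
        have hst : s = t ∨ s = -t := mul_self_eq_mul_self_iff.mp (hsq.trans ht0.symm)
        rcases hst with h | h
        · exact ⟨a, by omega⟩
        · exact ⟨3 * x * y - a, by omega⟩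
      exact hcase ⟨hsq, hpar⟩
    rw [hnil]
    rfl

-- ===== VERDICT (by name: the statement is the Claim_ definition above) =====
theorem markoff_spec : Claim_equal_markoff := by
  intro mx _
  unfold Spec_markoff markoff markoff_alt
  apply PySem.List.foldl_congr_mem
  intro res x hxmem
  have hx : 1 ≤ x := (PySem.List.mem_pyRange_one.mp hxmem).1
  apply PySem.List.foldl_congr_mem
  intro res' y hymem
  have hxy : x ≤ y := (PySem.List.mem_pyRange_one.mp hymem).1
  exact pv_inner mx x y hx hxy res'
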